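-- pv_equiv track=rewrite | github.com/NitinReddy-A/FusionPDF | PDF_Translation_Steps/step2.py | insert_newlines
-- ===== SOURCE A (Python) =====
-- def insert_newlines(text, translated_text):
--     # Find positions of '\n' in the original text
--     newline_positions = [pos for pos, char in enumerate(text) if char == '\n']
--
--     # Adjust positions for translated text
--     adjusted_positions = []
--     offset = 0
--     for pos in newline_positions:
--         while pos + offset < len(translated_text) and translated_text[pos + offset] != ' ':
--             offset += 1
--         adjusted_positions.append(pos + offset)
--
--     # Insert '\n' at the adjusted positions
--     for pos in reversed(adjusted_positions):  # reversed to avoid messing up positions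
--         translated_text = translated_text[:pos] + '\n' + translated_text[pos:]
--
--     return translated_text
-- ===== SOURCE B (Python) =====
-- def insert_newlines(text, translated_text):
--     # Single pass: collect the pieces of translated_text between adjusted
--     # newline positions and join them with '\n' (no repeated string rebuilding).
--     n = len(translated_text)
--     parts = []
--     prev = 0
--     offset = 0
--     for p, ch in enumerate(text):
--         if ch == '\n':
--             j = p + offset
--             while j < n and translated_text[j] != ' ':
--                 j += 1
--             offset = j - p
--             parts.append(translated_text[prev:j])
--             prev = j
--     parts.append(translated_text[prev:])
--     return '\n'.join(parts)
-- ===== Notes on version B (the rewrite author's own statement) =====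
-- stated objective: faster
-- what changed: Instead of collecting positions and then rebuilding the whole string once per inserted newline (reversed slicing inserts), B makes one pass over text, cutting translated_text into the pieces between adjusted positions and joining them once with '\n'.
import Mathlib
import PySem

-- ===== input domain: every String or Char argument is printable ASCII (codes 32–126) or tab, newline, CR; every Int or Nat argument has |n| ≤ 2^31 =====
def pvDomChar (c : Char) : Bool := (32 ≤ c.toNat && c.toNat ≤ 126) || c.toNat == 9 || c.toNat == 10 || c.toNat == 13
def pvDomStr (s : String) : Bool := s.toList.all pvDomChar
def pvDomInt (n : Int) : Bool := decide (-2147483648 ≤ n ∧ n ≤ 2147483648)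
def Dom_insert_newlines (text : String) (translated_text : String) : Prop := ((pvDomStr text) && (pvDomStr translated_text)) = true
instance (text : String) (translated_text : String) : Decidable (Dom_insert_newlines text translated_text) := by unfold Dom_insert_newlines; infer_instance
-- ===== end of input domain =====

-- B builds the pieces of translated_text between the adjusted newline positions in
-- one pass and joins them once, instead of A's per-insertion rebuild of the string.

-- ===== PORT A =====
-- shared helper: the scanning loop 'while j < len(t) and t[j] != " ": j += 1'
-- (this while-loop appears literally in both Pythons); returns the final j.
def pvSkip (t : List Char) (j : Int) : Int :=
  if h : j < (t.length : Int) ∧ PySem.List.pyGetD t j ' ' ≠ ' ' then pvSkip t (j + 1) else j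
termination_by ((t.length : Int) - j).toNat
decreasing_by omega

-- A: collect newline positions, adjust them with the running offset, then insert
-- '\n' back-to-front by rebuilding the string with slices.
def insert_newlines (text : String) (translated_text : String) : String :=
  let tl := translated_text.toList
  let newline_positions :=
    (PySem.List.enumerate text.toList).filterMap (fun pc => if pc.2 = '\n' then some pc.1 else none)
  let res := newline_positions.foldl
    (fun (st : Int × List Int) pos =>
      let offset := pvSkip tl (pos + st.1) - pos
      (offset, st.2 ++ [pos + offset])) (0, [])
  let out := res.2.reverse.foldl
    (fun s pos => PySem.List.slice s none (some pos) ++ '\n' :: PySem.List.slice s (some pos) none) tl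
  String.ofList out

-- ===== PORT B =====
def insert_newlines_alt (text : String) (translated_text : String) : String :=
  let tl := translated_text.toList
  let st := (PySem.List.enumerate text.toList).foldl
    (fun (st : List (List Char) × Int × Int) pc =>
      if pc.2 = '\n' then
        let j := pvSkip tl (pc.1 + st.2.2)
        (st.1 ++ [PySem.List.slice tl (some st.2.1) (some j)], j, j - pc.1)
      else st) ([], 0, 0)
  String.ofList (List.intercalate ['\n'] (st.1 ++ [PySem.List.slice tl (some st.2.1) none]))

-- ===== PRECONDITION & SPEC =====
def Spec_insert_newlines (text : String) (translated_text : String) (out : String) : Prop := out = insert_newlines_alt text translated_text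
instance (text : String) (translated_text : String) (out : String) : Decidable (Spec_insert_newlines text translated_text out) := by unfold Spec_insert_newlines; infer_instance

-- ===== CLAIM (what is proved, stated in full; the proofs are below) =====
def Claim_equal_insert_newlines : Prop := ∀ (text : String) (translated_text : String), Dom_insert_newlines text translated_text → Spec_insert_newlines text translated_text (insert_newlines text translated_text)

-- ===== LEMMAS AND PROOFS =====

def skipN (t : List Char) (j : Nat) : Nat :=
  if h : j < t.length ∧ t.getD j ' ' ≠ ' ' then skipN t (j + 1) else j
termination_by t.length - j

theorem skipN_ge (t : List Char) (n : Nat) : n ≤ skipN t n := by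
  induction n using skipN.induct t with
  | case1 n h ih => rw [skipN, dif_pos h]; omega
  | case2 n h => rw [skipN, dif_neg h]

theorem pvSkip_natCast (t : List Char) (n : Nat) : pvSkip t (n : Int) = (skipN t n : Int) := by
  induction n using skipN.induct t with
  | case1 n h ih =>
    rw [pvSkip, skipN]
    have hc : ((n : Int) < (t.length : Int) ∧ PySem.List.pyGetD t (n : Int) ' ' ≠ ' ') := by
      simpa using h
    rw [dif_pos hc, dif_pos h]
    exact_mod_cast ih
  | case2 n h =>
    rw [pvSkip, skipN]
    have hc : ¬((n : Int) < (t.length : Int) ∧ PySem.List.pyGetD t (n : Int) ' ' ≠ ' ') := by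
      simpa using h
    rw [dif_neg hc, dif_neg h]

def ins (q : Nat) (s : List Char) : List Char := s.take q ++ '\n' :: s.drop q

def npos : List Char → Nat → List Nat
  | [], _ => []
  | c :: cs, i => if c = '\n' then i :: npos cs (i + 1) else npos cs (i + 1)

def adj (t : List Char) : Nat → List Nat → List Nat
  | _, [] => []
  | off, p :: ps => skipN t (p + off) :: adj t (skipN t (p + off) - p) ps

def adjOff (t : List Char) : Nat → List Nat → Nat
  | off, [] => off
  | off, p :: ps => adjOff t (skipN t (p + off) - p) ps

def bp (t : List Char) : Nat → Nat → List Nat → List (List Char)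
  | prev, _, [] => [t.drop prev]
  | prev, off, p :: ps =>
    (t.drop prev).take (skipN t (p + off) - prev) ::
      bp t (skipN t (p + off)) (skipN t (p + off) - p) ps

def cuts (t : List Char) : Nat → List Nat → List (List Char)
  | prev, [] => [t.drop prev]
  | prev, q :: qs => (t.drop prev).take (q - prev) :: cuts t q qs

def G : List Nat → List Char → List Char
  | [], t => t
  | q :: qs, t => t.take q ++ '\n' :: G (qs.map (· - q)) (t.drop q)
termination_by qs _ => qs.length
decreasing_by simp

theorem npos_lb (l : List Char) : ∀ (i : Nat), ∀ q ∈ npos l i, i ≤ q := by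
  induction l with
  | nil => intro i q hq; simp [npos] at hq
  | cons c cs ih =>
    intro i q hq
    simp only [npos] at hq
    split at hq
    · rcases List.mem_cons.mp hq with h | h
      · omega
      · have := ih (i + 1) q h; omega
    · have := ih (i + 1) q hq; omega

theorem npos_pairwise (l : List Char) : ∀ (i : Nat), (npos l i).Pairwise (· < ·) := by
  induction l with
  | nil => intro i; simp [npos]
  | cons c cs ih =>
    intro i
    simp only [npos]
    split
    · exact List.Pairwise.cons (fun q hq => by have := npos_lb cs (i + 1) q hq; omega) (ih (i + 1))
    · exact ih (i + 1)

theorem adj_lb (t : List Char) (ps : List Nat) : ∀ (off c : Nat),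
    (∀ p ∈ ps, c ≤ p + off) → ∀ q ∈ adj t off ps, c ≤ q := by
  induction ps with
  | nil => intro off c _ q hq; simp [adj] at hq
  | cons p ps ih =>
    intro off c hlb q hq
    have hj : p + off ≤ skipN t (p + off) := skipN_ge t (p + off)
    simp only [adj] at hq
    rcases List.mem_cons.mp hq with h | h
    · have := hlb p (by simp); omega
    · refine ih (skipN t (p + off) - p) c ?_ q h
      intro p' hp'
      have := hlb p' (by simp [hp'])
      omega

theorem adj_pairwise (t : List Char) (ps : List Nat) : ∀ (off : Nat),
    ps.Pairwise (· < ·) → (adj t off ps).Pairwise (· ≤ ·) := by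
  induction ps with
  | nil => intro off _; simp [adj]
  | cons p ps ih =>
    intro off h
    rcases List.pairwise_cons.mp h with ⟨hp, hps⟩
    have hj : p + off ≤ skipN t (p + off) := skipN_ge t (p + off)
    simp only [adj]
    refine List.Pairwise.cons ?_ (ih _ hps)
    intro q hq
    refine adj_lb t ps _ _ ?_ q hq
    intro p' hp'
    have := hp p' hp'
    omega

theorem S_lemma (t : List Char) (p : Nat) (hp : p ≤ t.length) (qs : List Nat) :
    (∀ q ∈ qs, p ≤ q) →
    qs.foldr ins t = t.take p ++ (qs.map (· - p)).foldr ins (t.drop p) := by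
  induction qs with
  | nil => intro _; simp [List.take_append_drop]
  | cons q qs ih =>
    intro hlb
    have hq : p ≤ q := hlb q (by simp)
    rw [List.foldr_cons, ih (fun r hr => hlb r (by simp [hr])), List.map_cons, List.foldr_cons]
    unfold ins
    have hlen : (t.take p).length = p := by simp [hp]
    rw [List.take_append, List.drop_append, hlen]
    rw [List.take_take, Nat.min_eq_right hq, List.drop_eq_nil_of_le (by omega : (t.take p).length ≤ q)]
    simp

theorem T_lemma (qs : List Nat) (t : List Char) :
    (∀ q ∈ qs, t.length ≤ q) → qs.foldr ins t = t ++ List.replicate qs.length '\n' := by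
  induction qs with
  | nil => intro _; simp
  | cons q qs ih =>
    intro hlb
    have hq : t.length ≤ q := hlb q (by simp)
    rw [List.foldr_cons, ih (fun r hr => hlb r (by simp [hr]))]
    unfold ins
    rw [List.take_append, List.drop_append,
      List.take_of_length_le hq, List.drop_eq_nil_of_le hq, List.take_replicate, List.drop_replicate]
    simp only [List.nil_append, List.length_replicate, List.length_cons, List.append_assoc]
    congr 1
    rw [← List.replicate_succ, ← List.replicate_add]
    congr 1
    omega

theorem G_nil_str : ∀ (qs : List Nat), G qs [] = List.replicate qs.length '\n'
  | [] => by simp [G]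
  | q :: qs => by
    rw [G]
    simp only [List.take_nil, List.drop_nil]
    rw [G_nil_str (qs.map (· - q))]
    simp [List.replicate_succ]
termination_by qs => qs.length

theorem foldr_ins_eq_G : ∀ (qs : List Nat) (t : List Char), qs.Pairwise (· ≤ ·) →
    qs.foldr ins t = G qs t
  | [], t, _ => by simp [G]
  | q :: qs, t, h => by
    rcases List.pairwise_cons.mp h with ⟨hq, hqs⟩
    have hmap : (qs.map (· - q)).Pairwise (· ≤ ·) := by
      exact List.Pairwise.map _ (fun a b hab => Nat.sub_le_sub_right hab q) hqs
    by_cases hlen : q ≤ t.length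
    · rw [List.foldr_cons, S_lemma t q hlen qs hq]
      rw [foldr_ins_eq_G (qs.map (· - q)) (t.drop q) hmap]
      unfold ins
      have hlt : (t.take q).length = q := by simp [hlen]
      rw [List.take_append, List.drop_append, hlt, List.take_take]
      rw [Nat.min_self, Nat.sub_self, List.take_zero, List.drop_eq_nil_of_le (by omega), G]
      simp
    · push_neg at hlen
      have hall : ∀ r ∈ q :: qs, t.length ≤ r := by
        intro r hr
        rcases List.mem_cons.mp hr with h1 | h1
        · omega
        · exact le_trans hlen.le (hq r h1)
      rw [T_lemma (q :: qs) t hall, G]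
      rw [List.take_of_length_le hlen.le, List.drop_eq_nil_of_le hlen.le, G_nil_str]
      simp [List.replicate_succ]
termination_by qs => qs.length

theorem intercalate_pair (s a b : List Char) (l : List (List Char)) :
    List.intercalate s (a :: b :: l) = a ++ s ++ List.intercalate s (b :: l) := by
  simp [List.intercalate, List.intersperse]

theorem intercalate_one (s a : List Char) : List.intercalate s [a] = a := by
  simp [List.intercalate]

theorem intercalate_cuts (t : List Char) (qs : List Nat) : ∀ (prev : Nat),
    (∀ q ∈ qs, prev ≤ q) → qs.Pairwise (· ≤ ·) →
    List.intercalate ['\n'] (cuts t prev qs) = G (qs.map (· - prev)) (t.drop prev) := by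
  induction qs with
  | nil => intro prev _ _; rw [cuts, intercalate_one, List.map_nil, G]
  | cons q qs ih =>
    intro prev hlb h
    rcases List.pairwise_cons.mp h with ⟨hq, hqs⟩
    have hpq : prev ≤ q := hlb q (by simp)
    rw [cuts, List.map_cons, G]
    have hrec : List.intercalate ['\n'] (cuts t q qs) = G (qs.map (· - q)) (t.drop q) :=
      ih q hq hqs
    have hdd : (t.drop prev).drop (q - prev) = t.drop q := by
      rw [List.drop_drop]; congr 1; omega
    have hmm : (qs.map (· - prev)).map (· - (q - prev)) = qs.map (· - q) := by
      rw [List.map_map]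
      apply List.map_congr_left
      intro r hr
      simp only [Function.comp_apply]
      omega
    cases hcc : cuts t q qs with
    | nil => cases qs <;> simp [cuts] at hcc
    | cons b l =>
      rw [intercalate_pair, ← hcc, hrec, hdd, hmm]
      simp

theorem bp_eq_cuts (t : List Char) (ps : List Nat) : ∀ (prev off : Nat),
    bp t prev off ps = cuts t prev (adj t off ps) := by
  induction ps with
  | nil => intro prev off; rw [bp, adj, cuts]
  | cons p ps ih => intro prev off; rw [bp, adj, cuts, ih]

theorem enum_filterMap (l : List Char) : ∀ (i : Nat),
    (PySem.List.enumerate l (i : Int)).filterMap (fun pc => if pc.2 = '\n' then some pc.1 else none)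
      = (npos l i).map (fun (n : Nat) => (n : Int)) := by
  induction l with
  | nil => intro i; simp [PySem.List.enumerate_nil, npos]
  | cons c cs ih =>
    intro i
    rw [PySem.List.enumerate_cons, npos]
    have : ((i : Int) + 1) = ((i + 1 : Nat) : Int) := by push_cast; ring
    rw [List.filterMap_cons, this, ih (i + 1)]
    split <;> simp_all

theorem foldA (tl : List Char) (ps : List Nat) : ∀ (off : Nat) (acc : List Int),
    ((ps.map (fun (n : Nat) => (n : Int))).foldl
      (fun (st : Int × List Int) (pos : Int) =>
        (pvSkip tl (pos + st.1) - pos, st.2 ++ [pos + (pvSkip tl (pos + st.1) - pos)]))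
      ((off : Int), acc))
    = ((adjOff tl off ps : Int), acc ++ (adj tl off ps).map (fun (n : Nat) => (n : Int))) := by
  induction ps with
  | nil => intro off acc; simp [adjOff, adj]
  | cons p ps ih =>
    intro off acc
    rw [List.map_cons, List.foldl_cons]
    simp only []
    have hcast : ((p : Int) + (off : Int)) = ((p + off : Nat) : Int) := by push_cast; ring
    have hge : p + off ≤ skipN tl (p + off) := skipN_ge tl (p + off)
    have h1 : pvSkip tl ((p : Int) + (off : Int)) = ((skipN tl (p + off) : Nat) : Int) := by
      rw [hcast, pvSkip_natCast]
    simp only [h1]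
    have h2 : ((skipN tl (p + off) : Nat) : Int) - (p : Int) = ((skipN tl (p + off) - p : Nat) : Int) := by
      omega
    have h3 : (p : Int) + (((skipN tl (p + off) - p : Nat)) : Int) = ((skipN tl (p + off) : Nat) : Int) := by
      omega
    rw [h2, h3, ih (skipN tl (p + off) - p) (acc ++ [((skipN tl (p + off) : Nat) : Int)])]
    rw [adjOff, adj]
    simp

theorem foldr_slice_ins (tl : List Char) (X : List Nat) :
    X.foldr
      (fun (x : Nat) y =>
        PySem.List.slice y none (some (x : Int)) ++ '\n' :: PySem.List.slice y (some (x : Int)) none) tl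
    = X.foldr ins tl := by
  induction X with
  | nil => simp
  | cons p X ih =>
    simp only [List.foldr_cons, ih]
    rw [PySem.List.slice_to_natCast, PySem.List.slice_from_natCast]
    rfl

theorem foldB_enum (tl : List Char) (l : List Char) : ∀ (i : Nat) (st : List (List Char) × Int × Int),
    (PySem.List.enumerate l (i : Int)).foldl
      (fun (st : List (List Char) × Int × Int) pc =>
        if pc.2 = '\n' then
          (st.1 ++ [PySem.List.slice tl (some st.2.1) (some (pvSkip tl (pc.1 + st.2.2)))],
            pvSkip tl (pc.1 + st.2.2), pvSkip tl (pc.1 + st.2.2) - pc.1)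
        else st) st
    = (npos l i).foldl
      (fun (st : List (List Char) × Int × Int) (p : Nat) =>
        (st.1 ++ [PySem.List.slice tl (some st.2.1) (some (pvSkip tl ((p : Int) + st.2.2)))],
          pvSkip tl ((p : Int) + st.2.2), pvSkip tl ((p : Int) + st.2.2) - (p : Int))) st := by
  induction l with
  | nil => intro i st; simp [PySem.List.enumerate_nil, npos]
  | cons c cs ih =>
    intro i st
    rw [PySem.List.enumerate_cons, npos, List.foldl_cons]
    have hcast : ((i : Int) + 1) = ((i + 1 : Nat) : Int) := by push_cast; ring
    by_cases hc : c = '\n'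
    · rw [if_pos hc, if_pos hc, hcast, ih (i + 1), List.foldl_cons]
    · rw [if_neg hc, if_neg hc, hcast, ih (i + 1)]

theorem foldB (tl : List Char) (ps : List Nat) : ∀ (prev off : Nat) (parts : List (List Char)),
    (ps.foldl
      (fun (st : List (List Char) × Int × Int) (p : Nat) =>
        (st.1 ++ [PySem.List.slice tl (some st.2.1) (some (pvSkip tl ((p : Int) + st.2.2)))],
          pvSkip tl ((p : Int) + st.2.2), pvSkip tl ((p : Int) + st.2.2) - (p : Int)))
      (parts, (prev : Int), (off : Int))).1
      ++ [PySem.List.slice tl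
            (some (ps.foldl
              (fun (st : List (List Char) × Int × Int) (p : Nat) =>
                (st.1 ++ [PySem.List.slice tl (some st.2.1) (some (pvSkip tl ((p : Int) + st.2.2)))],
                  pvSkip tl ((p : Int) + st.2.2), pvSkip tl ((p : Int) + st.2.2) - (p : Int)))
              (parts, (prev : Int), (off : Int))).2.1) none]
    = parts ++ bp tl prev off ps := by
  induction ps with
  | nil =>
    intro prev off parts
    rw [bp]
    simp [PySem.List.slice_from_natCast]
  | cons p ps ih =>
    intro prev off parts
    rw [List.foldl_cons]
    simp only []
    have hcast : ((p : Int) + (off : Int)) = ((p + off : Nat) : Int) := by push_cast; ring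
    have hge : p + off ≤ skipN tl (p + off) := skipN_ge tl (p + off)
    have h1 : pvSkip tl ((p : Int) + (off : Int)) = ((skipN tl (p + off) : Nat) : Int) := by
      rw [hcast, pvSkip_natCast]
    simp only [h1]
    have h2 : ((skipN tl (p + off) : Nat) : Int) - (p : Int) = ((skipN tl (p + off) - p : Nat) : Int) := by
      omega
    rw [h2, PySem.List.slice_natCast,
      ih (skipN tl (p + off)) (skipN tl (p + off) - p)
        (parts ++ [(tl.drop prev).take (skipN tl (p + off) - prev)]), bp]
    simp

theorem portA_eval (text translated_text : String) :
    insert_newlines text translated_text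
      = String.ofList ((adj translated_text.toList 0 (npos text.toList 0)).foldr ins translated_text.toList) := by
  have h0 : (0 : Int) = ((0 : Nat) : Int) := rfl
  show (let tl := translated_text.toList
    let newline_positions :=
      (PySem.List.enumerate text.toList).filterMap (fun pc => if pc.2 = '\n' then some pc.1 else none)
    let res := newline_positions.foldl
      (fun (st : Int × List Int) pos =>
        let offset := pvSkip tl (pos + st.1) - pos
        (offset, st.2 ++ [pos + offset])) (0, [])
    let out := res.2.reverse.foldl
      (fun s pos => PySem.List.slice s none (some pos) ++ '\n' :: PySem.List.slice s (some pos) none) tl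
    String.ofList out) = _
  simp only []
  rw [h0, enum_filterMap, foldA]
  rw [List.nil_append]
  congr 1
  rw [← List.map_reverse, List.foldl_map, List.foldl_reverse]
  exact foldr_slice_ins translated_text.toList _

theorem portB_eval (text translated_text : String) :
    insert_newlines_alt text translated_text
      = String.ofList (List.intercalate ['\n'] (bp translated_text.toList 0 0 (npos text.toList 0))) := by
  have h0 : (0 : Int) = ((0 : Nat) : Int) := rfl
  show (let tl := translated_text.toList
    let st := (PySem.List.enumerate text.toList).foldl
      (fun (st : List (List Char) × Int × Int) pc =>
        if pc.2 = '\n' then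
          let j := pvSkip tl (pc.1 + st.2.2)
          (st.1 ++ [PySem.List.slice tl (some st.2.1) (some j)], j, j - pc.1)
        else st) ([], 0, 0)
    String.ofList (List.intercalate ['\n'] (st.1 ++ [PySem.List.slice tl (some st.2.1) none]))) = _
  simp only []
  rw [h0, foldB_enum, foldB]
  simp

theorem main_eq (text translated_text : String) :
    insert_newlines text translated_text = insert_newlines_alt text translated_text := by
  rw [portA_eval, portB_eval]
  congr 1
  rw [foldr_ins_eq_G _ _ (adj_pairwise _ _ 0 (npos_pairwise text.toList 0))]
  rw [bp_eq_cuts, intercalate_cuts translated_text.toList _ 0 (fun q _ => Nat.zero_le q)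
    (adj_pairwise _ _ 0 (npos_pairwise text.toList 0))]
  simp

-- ===== VERDICT (by name: the statement is the Claim_ definition above) =====
theorem insert_newlines_spec : Claim_equal_insert_newlines := by
  intro text translated_text _
  exact main_eq text translated_text
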